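-- pv_equiv track=rewrite | github.com/iitmsudhakar/Practice_Program_Python | Week_6/PPA_10.py | busy_cities
-- ===== SOURCE A (Python) =====
-- def group_by_city(scores_dataset):
--     cities = dict()
--     for student in scores_dataset:
--         city = student['City']
--         name = student['Name']
--         if city not in cities:
--             cities[city] = [ ]
--         cities[city].append(name)
--     return cities
--
-- def busy_cities(scores_dataset):
--     cities = group_by_city(scores_dataset)
--     busy = [ ]
--     maxpop = 0
--     for city in cities:
--         if len(cities[city]) >maxpop:
--             maxpop = len(cities[city])
--             busy = [city]
--         elif len(cities[city]) == maxpop: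
--             busy.append(city)
--     return busy
-- ===== SOURCE B (Python) =====
-- def busy_cities(scores_dataset):
--     counts = {}
--     for student in scores_dataset:
--         counts[student['City']] = counts.get(student['City'], 0) + 1
--     if not counts:
--         return []
--     top = max(counts.values())
--     return [city for city, n in counts.items() if n == top]
-- ===== Notes on version B (the rewrite author's own statement) =====
-- stated objective: simpler
-- what changed: B keeps only per-city counts (no name lists) and replaces A's one-pass running-max with reset/append by compute-the-global-max-then-filter over the counts dict.
import Mathlib
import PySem

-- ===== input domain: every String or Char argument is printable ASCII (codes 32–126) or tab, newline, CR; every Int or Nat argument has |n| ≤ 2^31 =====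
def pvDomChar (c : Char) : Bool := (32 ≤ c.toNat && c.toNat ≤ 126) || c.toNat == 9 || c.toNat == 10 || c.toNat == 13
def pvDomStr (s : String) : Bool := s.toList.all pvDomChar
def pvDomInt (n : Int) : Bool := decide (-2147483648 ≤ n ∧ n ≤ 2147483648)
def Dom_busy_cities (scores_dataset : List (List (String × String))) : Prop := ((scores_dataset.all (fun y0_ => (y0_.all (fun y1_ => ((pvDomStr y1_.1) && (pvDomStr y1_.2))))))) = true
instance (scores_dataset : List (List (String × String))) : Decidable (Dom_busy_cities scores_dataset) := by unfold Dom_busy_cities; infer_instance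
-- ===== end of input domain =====

-- B keeps only per-city counts and replaces A's one-pass running-max with reset/append
-- by compute-the-global-max-then-filter (objective: simpler); equivalence is about the return value.

-- ===== PORT A =====

-- student['Key'] : first-match lookup in the student dict (Pre_ guarantees the key is present)
def pvStudentGet (student : List (String × String)) (key : String) : String :=
  ((PySem.Dict.mk student).get? key).getD ""

-- body of A's grouping loop
def pvGroupStep (cities : PySem.Dict String (List String)) (student : List (String × String)) :
    PySem.Dict String (List String) :=
  let city := pvStudentGet student "City"
  let name := pvStudentGet student "Name"
  let cities := if cities.contains city then cities else cities.insert city []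
  cities.modify city [] (fun names => names ++ [name])

def group_by_city (scores_dataset : List (List (String × String))) :
    PySem.Dict String (List String) :=
  scores_dataset.foldl pvGroupStep PySem.Dict.empty

-- body of A's busy/maxpop loop; state (busy, maxpop), input (city, len(cities[city]))
def pvMaxStep (st : List String × Int) (p : String × Int) : List String × Int :=
  if p.2 > st.2 then ([p.1], p.2)
  else if p.2 = st.2 then (st.1 ++ [p.1], st.2)
  else st

def busy_cities (scores_dataset : List (List (String × String))) : List String :=
  let cities := group_by_city scores_dataset
  (cities.keys.foldl
    (fun st city => pvMaxStep st (city, ((cities.getD city []).length : Int))) ([], 0)).1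

-- ===== PORT B =====

-- body of B's counting loop: counts[city] = counts.get(city, 0) + 1
def pvCountStep (counts : PySem.Dict String Int) (student : List (String × String)) :
    PySem.Dict String Int :=
  counts.insert (pvStudentGet student "City") (counts.getD (pvStudentGet student "City") 0 + 1)

def busy_cities_alt (scores_dataset : List (List (String × String))) : List String :=
  let counts := scores_dataset.foldl pvCountStep PySem.Dict.empty
  if counts.size = 0 then []
  else
    match PySem.List.max? counts.values (fun v => v) with
    | none => []
    | some top => (counts.items.filter (fun p => p.2 == top)).map (fun p => p.1)

-- ===== PRECONDITION & SPEC =====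

-- A raises KeyError when some student dict lacks the key 'City' or 'Name'; Pre_ excludes exactly those.
def Pre_busy_cities (scores_dataset : List (List (String × String))) : Prop :=
  ∀ s ∈ scores_dataset, ((PySem.Dict.mk s).get? "City").isSome = true ∧
    ((PySem.Dict.mk s).get? "Name").isSome = true

instance (scores_dataset : List (List (String × String))) : Decidable (Pre_busy_cities scores_dataset) := by
  unfold Pre_busy_cities; infer_instance

def pvWitness_busy_cities : (List (List (String × String))) :=
  [[("City", "Pune"), ("Name", "Ann")], [("City", "Pune"), ("Name", "Bob")], [("City", "Agra"), ("Name", "Cid")]]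

def Spec_busy_cities (scores_dataset : List (List (String × String))) (out : List String) : Prop := out = busy_cities_alt scores_dataset
instance (scores_dataset : List (List (String × String))) (out : List String) : Decidable (Spec_busy_cities scores_dataset out) := by unfold Spec_busy_cities; infer_instance

-- ===== CLAIM (what is proved, stated in full; the proofs are below) =====
def Claim_equal_busy_cities : Prop := ∀ (scores_dataset : List (List (String × String))), Dom_busy_cities scores_dataset → Pre_busy_cities scores_dataset → Spec_busy_cities scores_dataset (busy_cities scores_dataset)

-- ===== LEMMAS AND PROOFS =====

-- (k, v) ↦ (k, len v): the shape relating A's grouping dict to B's count dict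
def pvLen2 (p : String × List String) : String × Int := (p.1, (p.2.length : Int))

lemma pv_modify_eq_insert {κ ν : Type} [BEq κ] (d : PySem.Dict κ ν) (k : κ) (d0 : ν) (f : ν → ν) :
    d.modify k d0 f = d.insert k (f (d.getD k d0)) := rfl

lemma pv_keys_eq (d : PySem.Dict String (List String)) (c : PySem.Dict String Int)
    (h : c.items = d.items.map pvLen2) : c.keys = d.keys := by
  simp only [PySem.Dict.keys, h, List.map_map]
  rfl

lemma pv_step_nodup (d : PySem.Dict String (List String)) (s : List (String × String))
    (hnd : d.keys.Nodup) : (pvGroupStep d s).keys.Nodup := by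
  simp only [pvGroupStep]
  by_cases hct : d.contains (pvStudentGet s "City") = true
  · rw [if_pos hct, pv_modify_eq_insert, PySem.Dict.keys_insert_of_contains _ _ hct]
    exact hnd
  · rw [if_neg hct, pv_modify_eq_insert, PySem.Dict.getD_insert_self,
      PySem.Dict.insert_insert_self,
      PySem.Dict.keys_insert_of_not_contains _ _ (by simp [hct])]
    refine List.Nodup.append hnd (List.nodup_singleton _) ?_
    intro a ha hb
    simp at hb; subst hb
    exact absurd ((PySem.Dict.contains_iff_mem_keys _ _).mpr ha) (by simp [hct])

-- one step of A's grouping and one step of B's counting preserve the (k, v) ↦ (k, len v) relation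
lemma pv_step_items (d : PySem.Dict String (List String)) (c : PySem.Dict String Int)
    (s : List (String × String)) (hnd : d.keys.Nodup)
    (h : c.items = d.items.map pvLen2) :
    (pvCountStep c s).items = (pvGroupStep d s).items.map pvLen2 := by
  have hkeys : c.keys = d.keys := pv_keys_eq d c h
  have hndc : c.keys.Nodup := by rw [hkeys]; exact hnd
  have hcon : ∀ k, c.contains k = d.contains k := by
    intro k
    rw [PySem.Dict.contains_eq_decide_mem_keys, PySem.Dict.contains_eq_decide_mem_keys, hkeys]
  simp only [pvCountStep, pvGroupStep]
  by_cases hct : d.contains (pvStudentGet s "City") = true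
  · rw [if_pos hct, pv_modify_eq_insert]
    obtain ⟨p, hpmem, hpfst⟩ : ∃ p ∈ d.items, p.1 = pvStudentGet s "City" := by
      have : pvStudentGet s "City" ∈ d.keys := (PySem.Dict.contains_iff_mem_keys _ _).mp hct
      simp only [PySem.Dict.keys, List.mem_map] at this
      obtain ⟨p, hp, hp2⟩ := this
      exact ⟨p, hp, hp2⟩
    have hgd : d.getD (pvStudentGet s "City") [] = p.2 := by
      rw [← hpfst]
      exact PySem.Dict.getD_of_mem_items d (by simpa using hpmem) hnd []
    have hgc : c.getD (pvStudentGet s "City") 0 = (p.2.length : Int) := by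
      have : (pvStudentGet s "City", (p.2.length : Int)) ∈ c.items := by
        rw [h, List.mem_map]
        exact ⟨p, hpmem, by simp [pvLen2, hpfst]⟩
      exact PySem.Dict.getD_of_mem_items c this hndc 0
    rw [PySem.Dict.items_insert_of_contains _ _ (by rw [hcon]; exact hct),
      PySem.Dict.items_insert_of_contains _ _ hct, h, List.map_map, List.map_map]
    refine List.map_congr_left ?_
    intro q hq
    by_cases hqc : q.1 = pvStudentGet s "City"
    · have hq2 : q.2 = p.2 := by
        have h1 : d.getD q.1 [] = q.2 := PySem.Dict.getD_of_mem_items d (by simpa using hq) hnd []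
        rw [hqc, hgd] at h1; exact h1.symm
      simp [pvLen2, hqc, hgd, hgc, hq2]
    · simp [pvLen2, hqc]
  · rw [if_neg hct, pv_modify_eq_insert, PySem.Dict.getD_insert_self,
      PySem.Dict.insert_insert_self]
    have hgc0 : c.getD (pvStudentGet s "City") 0 = 0 := by
      have : c.get? (pvStudentGet s "City") = none := by
        rw [PySem.Dict.get?_eq_none_iff_contains, hcon]; simp [hct]
      simp [PySem.Dict.getD, this]
    rw [PySem.Dict.items_insert_of_not_contains _ _ (by rw [hcon]; simp [hct]),
      PySem.Dict.items_insert_of_not_contains _ _ (by simp [hct]),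
      List.map_append, h]
    simp [pvLen2, hgc0]

lemma pv_fold_items (l : List (List (String × String))) (d : PySem.Dict String (List String))
    (c : PySem.Dict String Int) (hnd : d.keys.Nodup) (h : c.items = d.items.map pvLen2) :
    (l.foldl pvCountStep c).items = (l.foldl pvGroupStep d).items.map pvLen2 ∧
      (l.foldl pvGroupStep d).keys.Nodup := by
  induction l generalizing d c with
  | nil => exact ⟨h, hnd⟩
  | cons s t ih =>
      exact ih (pvGroupStep d s) (pvCountStep c s) (pv_step_nodup d s hnd) (pv_step_items d c s hnd h)

lemma pv_le_fold (l : List (String × Int)) (m : Int) :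
    m ≤ l.foldl (fun a p => max a p.2) m := by
  induction l generalizing m with
  | nil => simp
  | cons q t ih => exact le_trans (le_max_left m q.2) (ih (max m q.2))

-- A's running-max loop over a list of (city, count) pairs computes max-then-filter
lemma pv_loop_eq (l : List (String × Int)) (busy : List String) (m : Int) :
    l.foldl pvMaxStep (busy, m) =
      ((if m < l.foldl (fun a p => max a p.2) m then [] else busy) ++
        (l.filter (fun p => p.2 == l.foldl (fun a p => max a p.2) m)).map (fun p => p.1),
       l.foldl (fun a p => max a p.2) m) := by
  induction l generalizing busy m with
  | nil => simp
  | cons q t ih =>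
      obtain ⟨k, c⟩ := q
      simp only [List.foldl_cons]
      have hM := pv_le_fold t (max m c)
      by_cases h1 : c > m
      · have hmc : max m c = c := by omega
        rw [show pvMaxStep (busy, m) (k, c) = ([k], c) by simp [pvMaxStep, h1], ih]
        simp only [hmc] at hM ⊢
        by_cases h2 : c < t.foldl (fun a p => max a p.2) c
        · simp only [if_pos h2, if_pos (by omega : m < t.foldl (fun a p => max a p.2) c)]
          rw [List.filter_cons_of_neg (by simp; omega)]
        · have hc : c = t.foldl (fun a p => max a p.2) c := by omega
          rw [if_pos (show m < t.foldl (fun a p => max a p.2) c by omega),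
            List.filter_cons_of_pos (by simp; omega)]
          simp only [if_neg h2, List.map_cons, List.nil_append, List.singleton_append]
      · have hmc : max m c = m := by omega
        simp only [hmc] at hM ⊢
        by_cases h2 : c = m
        · rw [show pvMaxStep (busy, m) (k, c) = (busy ++ [k], m) by simp [pvMaxStep, h2], ih]
          by_cases h3 : m < t.foldl (fun a p => max a p.2) m
          · simp only [if_pos h3]
            rw [List.filter_cons_of_neg (by simp; omega)]
          · have hm : m = t.foldl (fun a p => max a p.2) m := by omega
            simp only [if_neg h3]
            rw [List.filter_cons_of_pos (by simp; omega)]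
            simp
        · rw [show pvMaxStep (busy, m) (k, c) = (busy, m) by simp [pvMaxStep, h1, h2], ih]
          rw [List.filter_cons_of_neg (by simp; omega)]

theorem pv_main (l : List (List (String × String)))
    (h1 : (l.foldl pvCountStep PySem.Dict.empty).items
        = (l.foldl pvGroupStep PySem.Dict.empty).items.map pvLen2)
    (h2 : (l.foldl pvGroupStep PySem.Dict.empty).keys.Nodup) :
    busy_cities l = busy_cities_alt l := by
  set cities := l.foldl pvGroupStep PySem.Dict.empty with hcit
  set counts := l.foldl pvCountStep PySem.Dict.empty with hcnt
  have hcounter : counts = PySem.Dict.counter (l.map (fun s => pvStudentGet s "City")) := by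
    rw [← PySem.Dict.foldl_insert_getD_add_one_eq_counter, List.foldl_map]
    rfl
  have hpos : ∀ p ∈ counts.items, 1 ≤ p.2 := by
    rw [hcounter, PySem.Dict.items_counter]
    intro p hp
    simp only [List.mem_map] at hp
    obtain ⟨k, hk, rfl⟩ := hp
    have hkmem : k ∈ l.map (fun s => pvStudentGet s "City") := (PySem.Set.mem_ofList _ _).mp hk
    have := List.count_pos_iff.mpr hkmem
    show (1 : Int) ≤ ((List.count k (l.map (fun s => pvStudentGet s "City")) : Nat) : Int)
    exact_mod_cast this
  have hA : busy_cities l = ((counts.items).foldl pvMaxStep ([], 0)).1 := by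
    show ((cities.keys.foldl
      (fun st city => pvMaxStep st (city, ((cities.getD city []).length : Int))) ([], 0)).1 : List String) = _
    rw [h1, PySem.Dict.items_eq_map_keys cities h2 [], List.map_map, List.foldl_map]
    rfl
  rw [hA, pv_loop_eq counts.items [] 0, ite_self, List.nil_append]
  have hsize : counts.size = counts.items.length := rfl
  have hvals : counts.values = counts.items.map (fun p => p.2) := rfl
  simp only [busy_cities_alt]
  rw [← hcnt]
  match hitems : counts.items with
  | [] =>
      rw [if_pos (show counts.size = 0 by rw [hsize, hitems]; rfl)]
      simp
  | p :: t =>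
      have hp1 : (1 : Int) ≤ p.2 := hpos p (by rw [hitems]; exact List.mem_cons_self)
      have htop : PySem.List.max? counts.values (fun v => v)
          = some ((p :: t).foldl (fun a q => max a q.2) 0) := by
        rw [hvals, hitems, List.map_cons, PySem.List.max?_id_cons, List.foldl_cons,
          show max (0 : Int) p.2 = p.2 from by omega]
        simp [List.foldl_map]
      rw [if_neg (show ¬ counts.size = 0 by rw [hsize, hitems]; simp)]
      rw [htop]

-- ===== VERDICT (by name: the statement is the Claim_ definition above) =====
theorem busy_cities_spec : Claim_equal_busy_cities := by
  intro l _ _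
  unfold Spec_busy_cities
  have hfold := pv_fold_items l PySem.Dict.empty PySem.Dict.empty
    PySem.Dict.nodup_keys_empty rfl
  exact pv_main l hfold.1 hfold.2
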